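-- pv_equiv track=rewrite | github.com/juzejunior/Faculdade | bioinfo/analyze.py | get_receipes
-- ===== SOURCE A (Python) =====
-- CODON_SIZE = 3
--
-- end_codons = ['taa', 'tag', 'tga']
--
-- def get_receipes(sequence):
--   sequence_list = list(sequence)
--   codon = ""
--   receipe = ""
--   for nucleotide in sequence_list:
--       codon += nucleotide
--       if len(codon) == CODON_SIZE:
--           receipe += codon
--           if codon in end_codons:
--               break
--           codon = ""
--   return receipe
-- ===== SOURCE B (Python) =====
-- CODON_SIZE = 3
--
-- end_codons = ['taa', 'tag', 'tga']
--
-- def get_receipes(sequence):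
--     seq = list(sequence)
--     n = len(seq) - len(seq) % CODON_SIZE
--     codons = [''.join(seq[i:i + CODON_SIZE]) for i in range(0, n, CODON_SIZE)]
--     for idx, codon in enumerate(codons):
--         if codon in end_codons:
--             return ''.join(codons[:idx + 1])
--     return ''.join(codons)
-- ===== Notes on version B (the rewrite author's own statement) =====
-- stated objective: alternative
-- what changed: A accumulates characters one at a time into a growing codon/receipe pair with an in-loop break; B builds the list of complete codons by stride-3 slicing, finds the index of the first stop codon, and joins the prefix up to and including it (or all codons).
import Mathlib
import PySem

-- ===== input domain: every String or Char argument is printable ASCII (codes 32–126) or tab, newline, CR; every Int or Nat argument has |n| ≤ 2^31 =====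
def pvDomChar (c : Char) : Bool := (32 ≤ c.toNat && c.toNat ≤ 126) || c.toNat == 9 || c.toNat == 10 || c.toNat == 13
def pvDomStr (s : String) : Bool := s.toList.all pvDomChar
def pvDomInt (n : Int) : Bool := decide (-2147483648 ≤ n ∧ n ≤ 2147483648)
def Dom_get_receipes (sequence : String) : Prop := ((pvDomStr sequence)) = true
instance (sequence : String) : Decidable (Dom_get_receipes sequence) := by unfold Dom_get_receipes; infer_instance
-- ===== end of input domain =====

-- B replaces A's char-by-char codon accumulation with stride-3 slicing plus find-first-stop over the codon list (alternative decomposition, same cost).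

-- ===== PORT A =====
def endCodons : List (List Char) := [['t','a','a'], ['t','a','g'], ['t','g','a']]

-- A's for-loop with break, state = (codon, receipe)
def getReceipesLoop : List Char → List Char → List Char → List Char
  | [], _codon, receipe => receipe
  | c :: rest, codon, receipe =>
    let codon' := codon ++ [c]
    if codon'.length = 3 then
      let receipe' := receipe ++ codon'
      if codon' ∈ endCodons then receipe'
      else getReceipesLoop rest [] receipe'
    else getReceipesLoop rest codon' receipe

def get_receipes (sequence : String) : String :=
  String.ofList (getReceipesLoop sequence.toList [] [])

-- ===== PORT B =====
-- codons = [''.join(seq[i:i+3]) for i in range(0, n, 3)]  with n = len(seq) - len(seq) % 3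
def altCodons (seq : List Char) : List (List Char) :=
  (PySem.List.pyRange 0 ((seq.length : Int) - PySem.Int.mod (seq.length : Int) 3) 3).map
    (fun i => PySem.List.slice seq (some i) (some (i + 3)))

def get_receipes_alt (sequence : String) : String :=
  match (altCodons sequence.toList).findIdx? (fun c => decide (c ∈ endCodons)) with
  | some idx => String.ofList ((altCodons sequence.toList).take (idx + 1)).flatten
  | none => String.ofList (altCodons sequence.toList).flatten

-- ===== PRECONDITION & SPEC =====
def Spec_get_receipes (sequence : String) (out : String) : Prop := out = get_receipes_alt sequence
instance (sequence : String) (out : String) : Decidable (Spec_get_receipes sequence out) := by unfold Spec_get_receipes; infer_instance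

-- ===== CLAIM (what is proved, stated in full; the proofs are below) =====
def Claim_equal_get_receipes : Prop := ∀ (sequence : String), Dom_get_receipes sequence → Spec_get_receipes sequence (get_receipes sequence)

-- ===== LEMMAS AND PROOFS =====

-- Common reference form: the codon string built three chars at a time, stopping after a stop codon.
def chunksF : List Char → List Char
  | a :: b :: c :: rest =>
    if [a, b, c] ∈ endCodons then [a, b, c] else [a, b, c] ++ chunksF rest
  | _ => []

-- The list of complete codons.
def chunks3 : List Char → List (List Char)
  | a :: b :: c :: rest => [a, b, c] :: chunks3 rest
  | _ => []

theorem loop_eq_chunksF (l : List Char) : ∀ acc, getReceipesLoop l [] acc = acc ++ chunksF l := by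
  induction l using chunks3.induct with
  | case1 a b c rest ih =>
      intro acc
      by_cases h : [a, b, c] ∈ endCodons
      · simp [getReceipesLoop, chunksF, h]
      · simp [getReceipesLoop, chunksF, h, ih]
  | case2 l h =>
      intro acc
      rcases l with _ | ⟨a, _ | ⟨b, _ | ⟨c, rest⟩⟩⟩
      · simp [getReceipesLoop, chunksF]
      · simp [getReceipesLoop, chunksF]
      · simp [getReceipesLoop, chunksF]
      · exact absurd rfl (fun he => h a b c rest he)

theorem pyRange_three (q : Nat) :
    PySem.List.pyRange 0 ((3 * q : Nat) : Int) 3 =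
      (List.range q).map (fun k => ((3 * k : Nat) : Int)) := by
  rw [PySem.List.pyRange_of_pos _ _ (by norm_num)]
  have hc : (if (0 : Int) < ((3 * q : Nat) : Int) then ((((3 * q : Nat) : Int) - 0 + 3 - 1) / 3).toNat else 0) = q := by
    split <;> omega
  rw [hc]
  apply List.map_congr_left
  intro k _
  push_cast; ring

theorem codons_eq_chunks3 (l : List Char) :
    (List.range (l.length / 3)).map (fun k => (l.drop (3 * k)).take 3) = chunks3 l := by
  induction l using chunks3.induct with
  | case1 a b c rest ih =>
      have hlen : (a :: b :: c :: rest).length / 3 = rest.length / 3 + 1 := by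
        simp [List.length_cons]; omega
      rw [hlen, List.range_succ_eq_map, List.map_cons, List.map_map]
      simp only [chunks3]
      rw [← ih]
      congr 1
  | case2 l h =>
      rcases l with _ | ⟨a, _ | ⟨b, _ | ⟨c, rest⟩⟩⟩
      · simp [chunks3]
      · simp [chunks3]
      · simp [chunks3]
      · exact absurd rfl (fun he => h a b c rest he)

theorem chunks3_eq_chunksF (l : List Char) :
    (match (chunks3 l).findIdx? (fun c => decide (c ∈ endCodons)) with
      | some idx => ((chunks3 l).take (idx + 1)).flatten
      | none => (chunks3 l).flatten) = chunksF l := by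
  induction l using chunks3.induct with
  | case1 a b c rest ih =>
      simp only [chunks3, chunksF]
      by_cases h : [a, b, c] ∈ endCodons
      · simp [List.findIdx?_cons, h]
      · cases hfi : (chunks3 rest).findIdx? (fun c => decide (c ∈ endCodons)) with
        | none =>
            rw [hfi] at ih
            simp [List.findIdx?_cons, h, hfi, ← ih]
        | some i =>
            rw [hfi] at ih
            simp [List.findIdx?_cons, h, hfi, ← ih]
  | case2 l h =>
      rcases l with _ | ⟨a, _ | ⟨b, _ | ⟨c, rest⟩⟩⟩
      · simp [chunks3, chunksF]
      · simp [chunks3, chunksF]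
      · simp [chunks3, chunksF]
      · exact absurd rfl (fun he => h a b c rest he)

theorem altCodons_eq_chunks3 (l : List Char) : altCodons l = chunks3 l := by
  unfold altCodons
  have hmod : ((l.length : Int)) - PySem.Int.mod (l.length : Int) 3 = ((3 * (l.length / 3) : Nat) : Int) := by
    have h1 : PySem.Int.mod (l.length : Int) 3 = (l.length : Int) % 3 := by
      simp [PySem.Int.mod, Int.fmod_eq_emod]
    rw [h1]
    push_cast
    omega
  rw [hmod, pyRange_three, List.map_map]
  rw [← codons_eq_chunks3]
  apply List.map_congr_left
  intro k _
  show PySem.List.slice l (some ((3 * k : Nat) : Int)) (some (((3 * k : Nat) : Int) + 3)) = _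
  have h3 : ((3 * k : Nat) : Int) + 3 = ((3 * k : Nat) : Int) + ((3 : Nat) : Int) := by norm_num
  rw [h3, PySem.List.slice_natCast_add]

theorem alt_eq_chunksF (s : String) : get_receipes_alt s = String.ofList (chunksF s.toList) := by
  unfold get_receipes_alt
  rw [altCodons_eq_chunks3]
  have h := chunks3_eq_chunksF s.toList
  cases hfi : (chunks3 s.toList).findIdx? (fun c => decide (c ∈ endCodons)) with
  | none => rw [hfi] at h; simp [← h]
  | some i => rw [hfi] at h; simp [← h]

-- ===== VERDICT (by name: the statement is the Claim_ definition above) =====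
theorem get_receipes_spec : Claim_equal_get_receipes := by
  intro s _
  unfold Spec_get_receipes get_receipes
  rw [alt_eq_chunksF, loop_eq_chunksF s.toList []]
  simp
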